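-- pv_equiv track=rewrite | github.com/RottenTangerine/mah-jong-JP | conversion.py | m_list_to_relative_m_list
-- ===== SOURCE A (Python) =====
-- def m_list_to_relative_m_list(_m, is_number=True):
--     """
--     convert m_list to relative m_list
--     :param _m: m_list
--     :param is_number: is the tile is a number tile (character, circle, stick)
--     :return:
--     """
--     m_list, s_list = [], []
--     for _tile in _m:
--         if not s_list:
--             s_list.append(_tile)
--             continue
--         if not is_number:
--             if _tile == s_list[-1]:
--                 s_list.append(_tile)
--                 continue
--         else:
--             if _tile - s_list[-1] < 3:
--                 s_list.append(_tile)
--                 continue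
--         m_list += [s_list]
--         s_list = [_tile]
--     else:
--         m_list += [s_list]
--     return m_list
-- ===== SOURCE B (Python) =====
-- def m_list_to_relative_m_list(_m, is_number=True):
--     """
--     convert m_list to relative m_list: split _m into runs by precomputed cut points
--     """
--     breaks = [i + 1 for i, (a, b) in enumerate(zip(_m, _m[1:]))
--               if (b - a >= 3 if is_number else b != a)]
--     bounds = [0, *breaks, len(_m)]
--     return [_m[lo:hi] for lo, hi in zip(bounds, bounds[1:])]
-- ===== Notes on version B (the rewrite author's own statement) =====
-- stated objective: alternative
-- what changed: Replaces A's stateful grow-a-current-group loop by a two-phase split: first precompute the cut indices from adjacent pairs (enumerate+zip), then slice the list at those boundaries with a pairwise zip over [0,*breaks,len].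
import Mathlib
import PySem

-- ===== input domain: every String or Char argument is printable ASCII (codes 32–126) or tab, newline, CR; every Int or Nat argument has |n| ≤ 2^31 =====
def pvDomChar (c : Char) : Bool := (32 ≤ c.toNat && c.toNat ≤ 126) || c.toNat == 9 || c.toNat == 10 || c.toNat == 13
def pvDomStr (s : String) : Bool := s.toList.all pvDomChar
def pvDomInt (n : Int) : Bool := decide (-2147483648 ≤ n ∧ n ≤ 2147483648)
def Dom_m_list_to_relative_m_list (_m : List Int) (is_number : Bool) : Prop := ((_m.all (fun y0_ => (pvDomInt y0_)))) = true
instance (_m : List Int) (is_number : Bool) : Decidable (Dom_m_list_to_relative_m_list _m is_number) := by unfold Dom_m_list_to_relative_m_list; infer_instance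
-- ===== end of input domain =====

-- B replaces A's stateful grow-a-current-group loop by precomputing cut indices from
-- adjacent pairs and slicing the list at those boundaries (alternative decomposition, same cost).


-- ===== PORT A =====
-- one loop step of A's for-loop; s_list[-1] is read with pyGet? (that branch is only reached
-- when s_list is nonempty, where pyGet? returns `some`, so the .getD 0 default is never used)
def pvStepA (is_number : Bool) (st : List (List Int) × List Int) (_tile : Int) :
    List (List Int) × List Int :=
  if st.2.isEmpty then (st.1, st.2 ++ [_tile])
  else if !is_number then
    if _tile = (PySem.List.pyGet? st.2 (-1)).getD 0 then (st.1, st.2 ++ [_tile])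
    else (st.1 ++ [st.2], [_tile])
  else
    if _tile - (PySem.List.pyGet? st.2 (-1)).getD 0 < 3 then (st.1, st.2 ++ [_tile])
    else (st.1 ++ [st.2], [_tile])

def m_list_to_relative_m_list (_m : List Int) (is_number : Bool) : List (List Int) :=
  let st := _m.foldl (pvStepA is_number) ([], [])
  st.1 ++ [st.2]

-- ===== PORT B =====
def m_list_to_relative_m_list_alt (_m : List Int) (is_number : Bool) : List (List Int) :=
  let breaks : List Int :=
    (PySem.List.enumerate (_m.zip (PySem.List.slice _m (some 1) none))).filterMap
      (fun p => if (if is_number then p.2.2 - p.2.1 ≥ 3 else p.2.2 ≠ p.2.1)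
                then some (p.1 + 1) else none)
  let bounds : List Int := 0 :: (breaks ++ [(_m.length : Int)])
  (bounds.zip (PySem.List.slice bounds (some 1) none)).map
    (fun q => PySem.List.slice _m (some q.1) (some q.2))

-- ===== PRECONDITION & SPEC =====
def Spec_m_list_to_relative_m_list (_m : List Int) (is_number : Bool) (out : List (List Int)) : Prop := out = m_list_to_relative_m_list_alt _m is_number
instance (_m : List Int) (is_number : Bool) (out : List (List Int)) : Decidable (Spec_m_list_to_relative_m_list _m is_number out) := by unfold Spec_m_list_to_relative_m_list; infer_instance

-- ===== CLAIM (what is proved, stated in full; the proofs are below) =====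
def Claim_equal_m_list_to_relative_m_list : Prop := ∀ (_m : List Int) (is_number : Bool), Dom_m_list_to_relative_m_list _m is_number → Spec_m_list_to_relative_m_list _m is_number (m_list_to_relative_m_list _m is_number)

-- ===== LEMMAS AND PROOFS =====
def pvAdj (isn : Bool) (a b : Int) : Bool := if isn then decide (b - a < 3) else a == b
theorem pvStepA_nonempty (isn : Bool) (st : List (List Int) × List Int) (h : st.2 ≠ [])
    (t : Int) :
    pvStepA isn st t =
      if pvAdj isn (st.2.getLast h) t then (st.1, st.2 ++ [t])
      else (st.1 ++ [st.2], [t]) := by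
  have hE : st.2.isEmpty = false := by simpa using h
  have hL : PySem.List.pyGet? st.2 (-1) = some (st.2.getLast h) := by
    rw [PySem.List.pyGet?_neg_one, List.getLast?_eq_some_getLast]
  simp only [pvStepA, hE, hL, Option.getD_some, pvAdj, Bool.false_eq_true, if_false]
  cases isn
  · simp only [Bool.not_false, if_true]
    by_cases he : t = st.2.getLast h
    · simp [he]
    · simp [he, Ne.symm he]
  · simp only [Bool.not_true, Bool.false_eq_true, if_false]
    simp
def pvSpan (isn : Bool) : Int → List Int → List Int × List Int
  | _, [] => ([], [])
  | prev, t :: ts =>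
    if pvAdj isn prev t then
      let p := pvSpan isn t ts
      (t :: p.1, p.2)
    else ([], t :: ts)
theorem pvSpan_len (isn : Bool) (prev : Int) (l : List Int) :
    (pvSpan isn prev l).2.length ≤ l.length := by
  induction l generalizing prev with
  | nil => simp [pvSpan]
  | cons t ts ih =>
    simp only [pvSpan]
    split
    · exact le_trans (ih t) (Nat.le_succ _)
    · simp
def pvChop (isn : Bool) : List Int → List (List Int)
  | [] => []
  | x :: xs =>
    (x :: (pvSpan isn x xs).1) :: pvChop isn (pvSpan isn x xs).2
termination_by l => l.length
decreasing_by
  simpa using Nat.lt_succ_of_le (pvSpan_len isn x xs)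
theorem pvFoldA (isn : Bool) (l : List Int) :
    ∀ (acc : List (List Int)) (cur : List Int) (h : cur ≠ []),
    (let st := l.foldl (pvStepA isn) (acc, cur)
     st.1 ++ [st.2]) =
      acc ++ (cur ++ (pvSpan isn (cur.getLast h) l).1) ::
        pvChop isn (pvSpan isn (cur.getLast h) l).2 := by
  induction l with
  | nil => intro acc cur h; simp [pvSpan, pvChop]
  | cons t ts ih =>
    intro acc cur h
    simp only [List.foldl_cons]
    rw [pvStepA_nonempty isn (acc, cur) h t]
    by_cases hadj : pvAdj isn (cur.getLast h) t
    · rw [if_pos hadj]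
      have h2 : cur ++ [t] ≠ [] := by simp
      have hlast : (cur ++ [t]).getLast h2 = t := by simp
      have := ih acc (cur ++ [t]) h2
      rw [hlast] at this
      rw [this]
      simp [pvSpan, hadj]
    · rw [if_neg hadj]
      have := ih (acc ++ [cur]) [t] (by simp)
      simp only [List.getLast_singleton] at this
      rw [this]
      simp only [pvSpan, hadj, Bool.false_eq_true, if_false]
      rw [pvChop]
      simp
def pvCast (n : Nat) : Int := Int.ofNat n
def pvBrks (isn : Bool) (s : Nat) : List Int → List Nat
  | a :: b :: ts =>
    if pvAdj isn a b then pvBrks isn (s+1) (b :: ts)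
    else (s+1) :: pvBrks isn (s+1) (b :: ts)
  | _ => []
theorem pvBrks_port (isn : Bool) (l : List Int) :
    ∀ (s : Nat),
    (PySem.List.enumerate (l.zip l.tail) (s : Int)).filterMap
      (fun p => if (if isn then p.2.2 - p.2.1 ≥ 3 else p.2.2 ≠ p.2.1)
                then some (p.1 + 1) else none)
      = (pvBrks isn s l).map pvCast := by
  induction l with
  | nil => intro s; simp [pvBrks, PySem.List.enumerate_nil]
  | cons a ts ih =>
    intro s
    cases ts with
    | nil => simp [pvBrks, PySem.List.enumerate_nil]
    | cons b ts' =>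
      simp only [List.tail_cons, List.zip_cons_cons]
      rw [PySem.List.enumerate_cons, List.filterMap_cons]
      have hrec := ih (s + 1)
      simp only [List.tail_cons] at hrec
      push_cast at hrec ⊢
      rw [hrec]
      cases isn with
      | false =>
        by_cases he : b ≠ a
        · have : pvAdj false a b = false := by simp [pvAdj]; omega
          simp [pvBrks, this, he]
          try simp [pvCast]
          try omega
        · have : pvAdj false a b = true := by simp [pvAdj]; omega
          simp [pvBrks, this, he]
          try simp [pvCast]
          try omega
      | true =>
        by_cases he : b - a ≥ 3
        · have : pvAdj true a b = false := by simp [pvAdj]; omega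
          simp [pvBrks, this, he]
          try simp [pvCast]
          try omega
        · have : pvAdj true a b = true := by simp [pvAdj]; omega
          simp [pvBrks, this, he]
          try simp [pvCast]
          try omega
theorem pvBrks_shift (isn : Bool) (l : List Int) :
    ∀ (s : Nat), pvBrks isn s l = (pvBrks isn 0 l).map (· + s) := by
  induction l with
  | nil => intro s; simp [pvBrks]
  | cons a ts ih =>
    intro s
    cases ts with
    | nil => simp [pvBrks]
    | cons b ts' =>
      rw [pvBrks, pvBrks]
      rw [ih (s+1), ih (0+1)]
      by_cases hadj : pvAdj isn a b
      · simp [hadj, List.map_map]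
        intro _ _; omega
      · simp [hadj, List.map_map]
        refine ⟨by omega, ?_⟩
        intro _ _; omega
theorem pvSpan_append (isn : Bool) (prev : Int) (l : List Int) :
    (pvSpan isn prev l).1 ++ (pvSpan isn prev l).2 = l := by
  induction l generalizing prev with
  | nil => simp [pvSpan]
  | cons t ts ih =>
    simp only [pvSpan]
    split
    · simpa using ih t
    · simp
theorem pvBrks_span (isn : Bool) (x : Int) (xs : List Int) :
    pvBrks isn 0 (x :: xs) =
      if (pvSpan isn x xs).2 = [] then []
      else (1 + (pvSpan isn x xs).1.length) ::
        (pvBrks isn 0 (pvSpan isn x xs).2).map (· + (1 + (pvSpan isn x xs).1.length)) := by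
  induction xs generalizing x with
  | nil => simp [pvBrks, pvSpan]
  | cons y ys ih =>
    by_cases hadj : pvAdj isn x y
    · rw [pvBrks, if_pos hadj, pvBrks_shift isn (y::ys) (0+1), ih y]
      by_cases hrest : (pvSpan isn y ys).2 = []
      · simp [pvSpan, hadj, hrest]
      · simp [pvSpan, hadj, hrest, List.map_map]
        try exact ⟨by omega, fun _ _ => by omega⟩
        try intro _ _
        try omega
    · rw [pvBrks, if_neg hadj, pvBrks_shift isn (y::ys) (0+1)]
      simp [pvSpan, hadj]
      try intro _ _
      try omega
theorem pvSlice_shift (g rest : List Int) (a b : Nat) :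
    PySem.List.slice (g ++ rest) (some ((a + g.length : Nat) : Int)) (some ((b + g.length : Nat) : Int))
      = PySem.List.slice rest (some (a : Int)) (some (b : Int)) := by
  rw [PySem.List.slice_natCast, PySem.List.slice_natCast]
  have h1 : (g ++ rest).drop (a + g.length) = rest.drop a := by
    rw [Nat.add_comm, List.drop_length_add_append]
  have h2 : b + g.length - (a + g.length) = b - a := by omega
  rw [h2, h1]
def pvSlices (l : List Int) (bs : List Nat) : List (List Int) :=
  (bs.zip bs.tail).map (fun q => PySem.List.slice l (some (q.1 : Int)) (some (q.2 : Int)))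
theorem pvSlices_map_shift (g rest : List Int) (bs : List Nat) :
    pvSlices (g ++ rest) (bs.map (· + g.length)) = pvSlices rest bs := by
  unfold pvSlices
  rw [← List.map_tail, List.zip_map, List.map_map]
  congr 1
  funext q
  exact pvSlice_shift g rest q.1 q.2
theorem pvSlices_cons (l : List Int) (c0 c1 : Nat) (cs : List Nat) :
    pvSlices l (c0 :: c1 :: cs) =
      PySem.List.slice l (some (c0 : Int)) (some (c1 : Int)) :: pvSlices l (c1 :: cs) := by
  simp [pvSlices]
theorem pvSlices_chop (isn : Bool) (n : Nat) :
    ∀ (l : List Int), l.length ≤ n → l ≠ [] →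
    pvSlices l (0 :: (pvBrks isn 0 l ++ [l.length])) = pvChop isn l := by
  induction n with
  | zero =>
    intro l hl hne
    cases l with
    | nil => exact absurd rfl hne
    | cons x xs => simp at hl
  | succ n ih =>
    intro l hl hne
    obtain ⟨x, xs, rfl⟩ := List.exists_cons_of_ne_nil hne
    have hxs : (pvSpan isn x xs).1 ++ (pvSpan isn x xs).2 = xs := pvSpan_append isn x xs
    have hlenxs := congrArg List.length hxs
    simp only [List.length_append] at hlenxs
    have hlen : (x :: xs).length = (1 + (pvSpan isn x xs).1.length) + (pvSpan isn x xs).2.length := by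
      simp only [List.length_cons]; omega
    rw [pvBrks_span]
    by_cases hrest : (pvSpan isn x xs).2 = []
    · rw [if_pos hrest]
      have hp1 : (pvSpan isn x xs).1 = xs := by
        rw [hrest] at hxs; simpa using hxs
      rw [pvChop, hrest, pvChop]
      simp only [List.nil_append]
      rw [pvSlices_cons]
      simp only [pvSlices, List.tail_cons, List.zip_nil_right, List.map_nil]
      rw [PySem.List.slice_natCast]
      simp [hp1]
    · rw [if_neg hrest]
      have hg : (x :: xs) = (x :: (pvSpan isn x xs).1) ++ (pvSpan isn x xs).2 := by
        conv_lhs => rw [← hxs]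
        rfl
      set k := 1 + (pvSpan isn x xs).1.length with hk
      rw [List.cons_append, pvSlices_cons]
      have hfirst : PySem.List.slice (x :: xs) (some ((0:Nat) : Int)) (some (k : Int))
          = x :: (pvSpan isn x xs).1 := by
        rw [PySem.List.slice_natCast, hg]
        have h2 : k - 0 = (x :: (pvSpan isn x xs).1).length := by
          simp only [List.length_cons]; omega
        rw [List.drop_zero, h2, List.take_left]
      rw [hfirst]
      have hbounds : (k :: ((pvBrks isn 0 (pvSpan isn x xs).2).map (· + k) ++ [(x :: xs).length]))
          = (0 :: (pvBrks isn 0 (pvSpan isn x xs).2 ++ [(pvSpan isn x xs).2.length])).map (· + k) := by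
        simp only [List.map_cons, List.map_append, List.map_nil, Nat.zero_add]
        rw [show (x :: xs).length = (pvSpan isn x xs).2.length + k from by omega]
      rw [hbounds]
      have hgl : k = (x :: (pvSpan isn x xs).1).length := by
        simp only [List.length_cons]; omega
      rw [hgl, hg, pvSlices_map_shift]
      rw [ih (pvSpan isn x xs).2 (by simp only [List.length_cons] at hl; omega) hrest]
      rw [← hg]
      rw [show pvChop isn (x :: xs)
            = (x :: (pvSpan isn x xs).1) :: pvChop isn (pvSpan isn x xs).2 from by rw [pvChop]]
theorem pvA_eq_chop (isn : Bool) (x : Int) (xs : List Int) :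
    m_list_to_relative_m_list (x :: xs) isn = pvChop isn (x :: xs) := by
  unfold m_list_to_relative_m_list
  simp only [List.foldl_cons]
  have h1 : pvStepA isn ([], []) x = ([], [x]) := by simp [pvStepA]
  rw [h1]
  have h := pvFoldA isn xs [] [x] (by simp)
  simp only [List.getLast_singleton] at h
  rw [h]
  rw [show pvChop isn (x :: xs)
        = (x :: (pvSpan isn x xs).1) :: pvChop isn (pvSpan isn x xs).2 from by rw [pvChop]]
  simp
theorem pvSlices_cast (l : List Int) (bs : List Nat) :
    ((bs.map pvCast).zip ((bs.map pvCast).tail)).map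
      (fun q => PySem.List.slice l (some q.1) (some q.2)) = pvSlices l bs := by
  cases bs with
  | nil => rfl
  | cons b bs =>
    induction bs generalizing b with
    | nil => rfl
    | cons c cs ih =>
      rw [pvSlices_cons]
      simp only [List.map_cons, List.tail_cons, List.zip_cons_cons, List.map_cons]
      rw [show pvCast b = ((b : Nat) : Int) from rfl, show pvCast c = ((c : Nat) : Int) from rfl]
      congr 1
      exact ih c
theorem pvSlices_cast' (l : List Int) (bs : List Nat) (len : Nat) :
    ((((0:Int) :: (bs.map pvCast ++ [(len : Int)])).zip (bs.map pvCast ++ [(len : Int)])).map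
      (fun q => PySem.List.slice l (some q.1) (some q.2))) = pvSlices l (0 :: (bs ++ [len])) := by
  have h1 : (bs.map pvCast ++ [(len : Int)]) = ((0 :: (bs ++ [len])).map pvCast).tail := by
    simp [pvCast]
  have h2 : ((0:Int) :: (bs.map pvCast ++ [(len : Int)])) = (0 :: (bs ++ [len])).map pvCast := by
    simp [pvCast]
  rw [h2, h1]
  exact pvSlices_cast l (0 :: (bs ++ [len]))
theorem pvB_eq_chop (isn : Bool) (x : Int) (xs : List Int) :
    m_list_to_relative_m_list_alt (x :: xs) isn = pvChop isn (x :: xs) := by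
  unfold m_list_to_relative_m_list_alt
  simp only [PySem.List.slice_from_one]
  have hbr := pvBrks_port isn (x :: xs) 0
  simp only [Nat.cast_zero, List.tail_cons] at hbr
  simp only [List.tail_cons]
  rw [hbr]
  rw [pvSlices_cast']
  exact pvSlices_chop isn (x :: xs).length (x :: xs) le_rfl (by simp)

-- ===== VERDICT (by name: the statement is the Claim_ definition above) =====
theorem m_list_to_relative_m_list_spec : Claim_equal_m_list_to_relative_m_list := by
  intro _m isn _
  unfold Spec_m_list_to_relative_m_list
  cases _m with
  | nil => cases isn <;> rfl
  | cons x xs => rw [pvA_eq_chop, pvB_eq_chop]
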